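-- pv_equiv track=rewrite | github.com/xiaomaniay/algo-practice | Random_Test/Recover_Rotated_Sorted_Array.py | recoverRotatedSortedArray
-- ===== SOURCE A (Python) =====
-- def recoverRotatedSortedArray(nums):
--     if not nums:
--         return None
--     min_indx = 0
--     for i in range(1, len(nums)):
--         if nums[i] < nums[min_indx]:
--             min_indx = i
--     temp = nums[:min_indx]
--     for j in range(min_indx, len(nums)):
--         nums[j - min_indx] = nums[j]
--     nums[len(nums) - min_indx:] = temp
--     return nums
-- ===== SOURCE B (Python) =====
-- def _reverse(nums, i, j):
--     while i < j:
--         nums[i], nums[j] = nums[j], nums[i]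
--         i += 1
--         j -= 1
--
--
-- def recoverRotatedSortedArray(nums):
--     if not nums:
--         return None
--     k = nums.index(min(nums))
--     _reverse(nums, 0, k - 1)
--     _reverse(nums, k, len(nums) - 1)
--     _reverse(nums, 0, len(nums) - 1)
--     return nums
-- ===== Notes on version B (the rewrite author's own statement) =====
-- stated objective: alternative
-- what changed: B recovers the rotation by three in-place two-pointer segment reversals (reverse nums[:k], reverse nums[k:], reverse the whole list) around the first index of the minimum, instead of A's element-by-element left shift followed by a tail slice assignment.
import Mathlib
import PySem

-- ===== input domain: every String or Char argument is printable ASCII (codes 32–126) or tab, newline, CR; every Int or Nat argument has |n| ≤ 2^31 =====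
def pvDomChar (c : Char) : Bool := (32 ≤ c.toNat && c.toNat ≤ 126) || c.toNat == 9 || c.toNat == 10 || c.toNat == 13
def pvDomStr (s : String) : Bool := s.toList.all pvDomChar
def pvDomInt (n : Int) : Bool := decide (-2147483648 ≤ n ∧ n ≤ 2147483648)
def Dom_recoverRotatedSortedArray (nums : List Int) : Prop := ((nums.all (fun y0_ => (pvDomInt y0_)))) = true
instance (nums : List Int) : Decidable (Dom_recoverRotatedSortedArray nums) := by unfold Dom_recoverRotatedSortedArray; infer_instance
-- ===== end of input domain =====

-- B recovers the rotation with three in-place two-pointer reversals instead of A's shift-and-slice copy (objective: alternative; A mutates its argument in place, B performs the same mutation; the equivalence proved here is about the return value).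


-- ===== PORT A =====
def recoverRotatedSortedArray (nums : List Int) : Option (List Int) :=
  if nums = [] then none
  else
    let minIdx := (PySem.List.pyRange 1 (nums.length : Int) 1).foldl
      (fun mi i => if PySem.List.pyGetD nums i 0 < PySem.List.pyGetD nums mi 0 then i else mi) 0
    let temp := PySem.List.slice nums none (some minIdx)
    let shifted := (PySem.List.pyRange minIdx (nums.length : Int) 1).foldl
      (fun acc j => PySem.List.pySetD acc (j - minIdx) (PySem.List.pyGetD acc j 0)) nums
    some (PySem.List.slice shifted none (some ((nums.length : Int) - minIdx)) ++ temp)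

-- ===== PORT B =====
-- two-pointer in-place reversal of xs[i..j] (Source B's _reverse)
def pvRevRange (xs : List Int) (i j : Int) : List Int :=
  if _h : i < j then
    let a := PySem.List.pyGetD xs i 0
    let b := PySem.List.pyGetD xs j 0
    pvRevRange (PySem.List.pySetD (PySem.List.pySetD xs i b) j a) (i + 1) (j - 1)
  else xs
termination_by (j - i).toNat
decreasing_by simp_wf; omega

def recoverRotatedSortedArray_alt (nums : List Int) : Option (List Int) :=
  if nums = [] then none
  else
    match PySem.List.min? nums (fun x => x) with
    | none => none  -- unreachable: nums ≠ []
    | some m =>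
      match PySem.List.index? nums m with
      | none => none  -- unreachable: m ∈ nums
      | some k =>
        let n : Int := nums.length
        let l1 := pvRevRange nums 0 ((k : Int) - 1)
        let l2 := pvRevRange l1 (k : Int) (n - 1)
        some (pvRevRange l2 0 (n - 1))

-- ===== PRECONDITION & SPEC =====
def Spec_recoverRotatedSortedArray (nums : List Int) (out : Option (List Int)) : Prop := out = recoverRotatedSortedArray_alt nums
instance (nums : List Int) (out : Option (List Int)) : Decidable (Spec_recoverRotatedSortedArray nums out) := by unfold Spec_recoverRotatedSortedArray; infer_instance

-- ===== CLAIM (what is proved, stated in full; the proofs are below) =====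
def Claim_equal_recoverRotatedSortedArray : Prop := ∀ (nums : List Int), Dom_recoverRotatedSortedArray nums → Spec_recoverRotatedSortedArray nums (recoverRotatedSortedArray nums)

-- ===== LEMMAS AND PROOFS =====

theorem pvRevRange_seg : ∀ (fuel : Nat) (pre mid post : List Int) (i j : Int),
    mid.length ≤ fuel → i = (pre.length : Int) → j = (pre.length : Int) + mid.length - 1 →
    pvRevRange (pre ++ mid ++ post) i j = pre ++ mid.reverse ++ post := by
  intro fuel
  induction fuel using Nat.strong_induction_on with
  | _ fuel IH =>
    intro pre mid post i j hle hi hj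
    rcases mid with _ | ⟨a, t⟩
    · rw [pvRevRange, dif_neg (by simp at hj; omega)]; simp
    · rcases t.eq_nil_or_concat with rfl | ⟨ms, b, rfl⟩
      · rw [pvRevRange, dif_neg (by simp at hj; omega)]; simp
      · simp only [List.concat_eq_append] at *
        have hlen : (a :: (ms ++ [b])).length = ms.length + 2 := by simp
        have hj' : j = ((pre.length + ms.length + 1 : Nat) : Int) := by
          rw [hlen] at hj; push_cast at hj ⊢; omega
        rw [pvRevRange, dif_pos (by rw [hi, hj']; push_cast; omega)]
        subst hi hj'
        simp only [PySem.List.pyGetD_natCast, PySem.List.pySetD_natCast]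
        have hget_a : (pre ++ (a :: (ms ++ [b])) ++ post).getD pre.length 0 = a := by
          rw [List.append_assoc, List.getD_append_right pre _ 0 pre.length le_rfl]
          simp [List.getD]
        have hget_b : (pre ++ (a :: (ms ++ [b])) ++ post).getD (pre.length + ms.length + 1) 0 = b := by
          rw [List.append_assoc, List.getD_append_right pre _ 0 _ (by omega)]
          have : pre.length + ms.length + 1 - pre.length = ms.length + 1 := by omega
          rw [this]
          simp [List.getD]
        rw [hget_a, hget_b]
        have hset : ((pre ++ (a :: (ms ++ [b])) ++ post).set pre.length b).set (pre.length + ms.length + 1) a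
            = (pre ++ [b]) ++ ms ++ ([a] ++ post) := by
          rw [List.append_assoc, List.set_append_right _ _ le_rfl,
              List.set_append_right _ _ (by omega)]
          simp only [Nat.sub_self]
          have : pre.length + ms.length + 1 - pre.length = ms.length + 1 := by omega
          rw [this]
          have h2 : (b :: (ms ++ [b] ++ post)).set (ms.length + 1) a = b :: (ms ++ [a] ++ post) := by
            simp only [List.set_cons_succ]
            rw [List.append_assoc, List.set_append_right _ _ le_rfl]
            simp
          simp only [List.append_assoc, List.cons_append, List.set_cons_zero] at h2 ⊢
          rw [h2]; simp
        rw [hset]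
        have := IH (fuel - 1) (by simp at hle; omega) (pre ++ [b]) ms ([a] ++ post)
          ((pre.length : Int) + 1) ((pre.length : Int) + (ms.length + 1 : Nat) - 1)
          (by simp at hle ⊢; omega) (by simp) (by push_cast; simp; ring)
        simp only [List.append_assoc] at this ⊢
        push_cast at this ⊢
        have harg : ((pre.length : Int)) + (↑ms.length + 1) - 1 = ↑pre.length + ↑ms.length + 1 - 1 := by ring
        rw [show ((pre.length:Int)) + ↑ms.length + 1 - 1 = ↑pre.length + (↑ms.length + 1) - 1 by ring]
        rw [this]
        simp


theorem pvShiftLoop (nums : List Int) (K : Nat) (t : Nat) (ht : K + t ≤ nums.length) :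
    (PySem.List.pyRange (K : Int) ((K : Int) + (t : Int)) 1).foldl
      (fun acc j => PySem.List.pySetD acc (j - (K : Int)) (PySem.List.pyGetD acc j 0)) nums
    = (nums.drop K).take t ++ nums.drop t := by
  induction t with
  | zero => simp [PySem.List.pyRange_one_eq_nil]
  | succ t ih =>
    have h1 : (K : Int) + ((t : Nat) + 1 : Nat) = ((K : Int) + t) + 1 := by omega
    rw [h1, PySem.List.pyRange_one_succ_right (by omega), List.foldl_append]
    rw [ih (by omega)]
    simp only [List.foldl_cons, List.foldl_nil]
    have hKt : (K : Int) + (t : Int) - (K : Int) = ((t : Nat) : Int) := by ring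
    have hKt2 : (K : Int) + (t : Int) = ((K + t : Nat) : Int) := by push_cast; ring
    rw [hKt, hKt2, PySem.List.pySetD_natCast, PySem.List.pyGetD_natCast]
    have hlenpre : ((nums.drop K).take t).length = t := by
      simp; omega
    have hget : ((nums.drop K).take t ++ nums.drop t).getD (K + t) 0 = nums.getD (K + t) 0 := by
      rw [List.getD_append_right _ _ 0 _ (by rw [hlenpre]; omega), hlenpre]
      simp [List.getD, List.getElem?_drop]
      rw [Nat.add_comm t K]
    rw [hget]
    rw [List.set_append_right _ _ (by rw [hlenpre]), hlenpre, Nat.sub_self]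
    have hdrop : nums.drop t = nums.getD t 0 :: nums.drop (t + 1) := by
      rw [List.getD_eq_getElem _ _ (by omega), List.getElem_cons_drop]
    rw [hdrop]
    simp only [List.set_cons_zero]
    have htake : (nums.drop K).take (t + 1) = (nums.drop K).take t ++ [nums.getD (K + t) 0] := by
      rw [List.getD_eq_getElem _ _ (by omega)]
      rw [List.take_add_one]
      congr 1
      rw [List.getElem?_drop]
      simp [List.getElem?_eq_getElem (by omega : K + t < nums.length)]
    rw [htake]
    simp


theorem pvArgmin (nums : List Int) (K : Nat) (hn : 0 < nums.length) (hK : K < nums.length)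
    (hmin : ∀ j < nums.length, nums.getD K 0 ≤ nums.getD j 0)
    (hfirst : ∀ j < K, nums.getD K 0 < nums.getD j 0) :
    (PySem.List.pyRange 1 (nums.length : Int) 1).foldl
      (fun mi i => if PySem.List.pyGetD nums i 0 < PySem.List.pyGetD nums mi 0 then i else mi) 0
    = (K : Int) := by
  have aux : ∀ m : Nat, 1 ≤ m → m ≤ nums.length →
      ∃ R : Nat, (PySem.List.pyRange 1 (m : Int) 1).foldl
        (fun mi i => if PySem.List.pyGetD nums i 0 < PySem.List.pyGetD nums mi 0 then i else mi) 0 = (R : Int)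
        ∧ R < m ∧ (∀ j < m, nums.getD R 0 ≤ nums.getD j 0) ∧ (∀ j < R, nums.getD R 0 < nums.getD j 0) := by
    intro m
    induction m with
    | zero => omega
    | succ m ih =>
      intro _ hm1
      rcases Nat.eq_zero_or_pos m with rfl | hm
      · refine ⟨0, ?_, by omega, ?_, by omega⟩
        · rw [PySem.List.pyRange_one_eq_nil (by norm_num)]; rfl
        · intro j hj; interval_cases j; exact le_rfl
      · obtain ⟨R, hfold, hRlt, hRmin, hRfirst⟩ := ih hm (by omega)
        have hcast : ((m + 1 : Nat) : Int) = (m : Int) + 1 := by push_cast; ring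
        rw [hcast, PySem.List.pyRange_one_succ_right (by exact_mod_cast hm), List.foldl_append,
            hfold, List.foldl_cons, List.foldl_nil]
        simp only [PySem.List.pyGetD_natCast]
        by_cases hlt : nums.getD m 0 < nums.getD R 0
        · rw [if_pos hlt]
          refine ⟨m, rfl, by omega, ?_, ?_⟩
          · intro j hj
            rcases Nat.lt_or_ge j m with h | h
            · exact le_of_lt (lt_of_lt_of_le hlt (hRmin j h))
            · have : j = m := by omega
              subst this; exact le_rfl
          · intro j hj
            exact lt_of_lt_of_le hlt (hRmin j hj)
        · rw [if_neg hlt]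
          refine ⟨R, rfl, by omega, ?_, hRfirst⟩
          intro j hj
          rcases Nat.lt_or_ge j m with h | h
          · exact hRmin j h
          · have : j = m := by omega
            subst this; omega
  obtain ⟨R, hfold, hRlt, hRmin, hRfirst⟩ := aux nums.length (by omega) le_rfl
  rw [hfold]
  have : R = K := by
    rcases Nat.lt_trichotomy R K with h | h | h
    · have h1 := hfirst R h
      have h2 := hRmin K hK
      omega
    · exact h
    · have h1 := hRfirst K h
      have h2 := hmin R hRlt
      omega
  rw [this]



-- ===== VERDICT (by name: the statement is the Claim_ definition above) =====
theorem recoverRotatedSortedArray_spec : Claim_equal_recoverRotatedSortedArray := by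
  intro nums _
  unfold Spec_recoverRotatedSortedArray

  by_cases h : nums = []
  · simp [recoverRotatedSortedArray, recoverRotatedSortedArray_alt, h]
  · have hn : 0 < nums.length := List.length_pos_iff.mpr h
    -- B's min and first index
    rcases hm : PySem.List.min? nums (fun x => x) with _ | m
    · rw [PySem.List.min?_eq_none_iff] at hm; exact absurd hm h
    rcases hk : PySem.List.index? nums m with _ | k
    · rw [PySem.List.index?_eq_none_iff] at hk
      exact absurd (PySem.List.min?_mem hm) hk
    obtain ⟨hklt, hkv, hbefore⟩ := PySem.List.getElem_of_index?_eq_some hk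
    have hisMin := PySem.List.min?_isMin hm
    have hmin : ∀ j < nums.length, nums.getD k 0 ≤ nums.getD j 0 := by
      intro j hj
      rw [List.getD_eq_getElem _ _ hklt, List.getD_eq_getElem _ _ hj, hkv]
      exact hisMin _ (List.getElem_mem hj)
    have hfirst : ∀ j < k, nums.getD k 0 < nums.getD j 0 := by
      intro j hj
      rw [List.getD_eq_getElem _ _ hklt, List.getD_eq_getElem _ _ (by omega), hkv]
      have hne := hbefore j hj
      have hle := hisMin _ (List.getElem_mem (show j < nums.length by omega))
      exact lt_of_le_of_ne hle (Ne.symm hne)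
    -- A side
    rw [recoverRotatedSortedArray, if_neg h]
    simp only
    rw [pvArgmin nums k hn hklt hmin hfirst]
    have hsplit : (nums.length : Int) = (k : Int) + ((nums.length - k : Nat) : Int) := by
      omega
    rw [hsplit, pvShiftLoop nums k (nums.length - k) (by omega)]
    have hdk : (nums.drop k).take (nums.length - k) = nums.drop k := by
      apply List.take_of_length_le; simp
    rw [hdk]
    have hslice1 : PySem.List.slice nums none (some ((k : Nat) : Int)) = nums.take k :=
      PySem.List.slice_to_natCast nums k
    have harith : (k : Int) + ((nums.length - k : Nat) : Int) - (k : Int) = ((nums.length - k : Nat) : Int) := by ring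
    rw [hslice1, harith, PySem.List.slice_to_natCast]
    have htl : (nums.drop k ++ nums.drop (nums.length - k)).take (nums.length - k) = nums.drop k := by
      rw [List.take_left' (by simp)]
    rw [htl]
    -- B side
    rw [recoverRotatedSortedArray_alt, if_neg h]
    simp only [hm, hk]
    have hb1 : pvRevRange nums 0 ((k : Int) - 1) = (nums.take k).reverse ++ nums.drop k := by
      have := pvRevRange_seg k [] (nums.take k) (nums.drop k) 0 ((k : Int) - 1)
        (by simp) (by simp) (by simp [List.length_take]; omega)
      simpa using this
    have hb2 : pvRevRange ((nums.take k).reverse ++ nums.drop k) (k : Int) ((nums.length : Int) - 1)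
        = (nums.take k).reverse ++ (nums.drop k).reverse := by
      have := pvRevRange_seg nums.length ((nums.take k).reverse) (nums.drop k) [] (k : Int) ((nums.length : Int) - 1)
        (by simp) (by simp [List.length_take]; omega) (by simp [List.length_take]; omega)
      simpa using this
    have hb3 : pvRevRange ((nums.take k).reverse ++ (nums.drop k).reverse) 0 ((nums.length : Int) - 1)
        = nums.drop k ++ nums.take k := by
      have := pvRevRange_seg nums.length [] ((nums.take k).reverse ++ (nums.drop k).reverse) [] 0 ((nums.length : Int) - 1)
        (by simp [List.length_take]; omega) (by simp) (by simp [List.length_take]; omega)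
      simpa using this
    rw [hb1, hb2, hb3]
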